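-- pv_equiv track=rewrite | github.com/Prakashdeveloper03/GeeksforGeeks-Problem-Solutions | Medium/Minimum sum/minSum.py | solve
-- ===== SOURCE A (Python) =====
-- def solve(arr, n):
--     arr.sort()
--     n1 = 0
--     n2 = 0
--     for i in range(n):
--         if i % 2 == 0:
--             n1 = n1 * 10 + arr[i]
--         else:
--             n2 = n2 * 10 + arr[i]
--     return n1 + n2
-- ===== SOURCE B (Python) =====
-- def solve(arr, n):
--     # Same return value as A; like A, sorts arr in place (observable mutation).
--     # Instead of Horner-building two interleaved numbers, weight each sorted
--     # digit directly by its final positional power of ten and sum once.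
--     arr.sort()
--     return sum(arr[i] * 10 ** ((n - 1 - i) // 2) for i in range(n))
-- ===== Notes on version B (the rewrite author's own statement) =====
-- stated objective: alternative
-- what changed: Replaces the two Horner accumulators built over alternating indices by a single closed-form sum in which each sorted element is multiplied directly by its final positional weight 10**((n-1-i)//2).
import Mathlib
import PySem

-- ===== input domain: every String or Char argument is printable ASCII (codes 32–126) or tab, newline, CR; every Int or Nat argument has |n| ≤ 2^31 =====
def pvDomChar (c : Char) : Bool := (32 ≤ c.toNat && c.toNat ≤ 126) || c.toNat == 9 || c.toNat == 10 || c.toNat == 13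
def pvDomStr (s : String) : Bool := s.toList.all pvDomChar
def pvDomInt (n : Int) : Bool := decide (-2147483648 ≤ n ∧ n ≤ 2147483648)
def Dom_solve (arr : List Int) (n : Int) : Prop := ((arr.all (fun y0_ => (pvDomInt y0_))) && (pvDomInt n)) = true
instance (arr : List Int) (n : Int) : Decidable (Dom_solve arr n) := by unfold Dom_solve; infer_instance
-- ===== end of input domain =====

-- B replaces A's two interleaved Horner accumulators by a single closed-form
-- sum weighting each sorted element by 10^((n-1-i)//2); same cost (alternative
-- decomposition, not faster). Equivalence is about the return value; both
-- Pythons sort arr in place.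


-- ===== PORT A =====
-- the for-loop over range(n): state (n1, n2); `none` = the IndexError arr[i] raises
def solveLoop (a : List Int) (r : List Int) : Option (Int × Int) :=
  r.foldl
    (fun st i =>
      match st with
      | none => none
      | some (n1, n2) =>
        match PySem.List.pyGet? a i with
        | none => none
        | some v =>
          if PySem.Int.mod i 2 = 0 then some (n1 * 10 + v, n2) else some (n1, n2 * 10 + v))
    (some (0, 0))

def solve (arr : List Int) (n : Int) : Int :=
  let a := PySem.List.sorted arr (fun x => x) false   -- arr.sort()
  match solveLoop a (PySem.List.pyRange 0 n 1) with
  | some (n1, n2) => n1 + n2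
  | none => 0   -- unreachable under Pre_solve (IndexError in Python)

-- ===== PORT B =====
def solve_alt (arr : List Int) (n : Int) : Int :=
  let a := PySem.List.sorted arr (fun x => x) false   -- arr.sort()
  -- sum(a[i] * 10 ** ((n - 1 - i) // 2) for i in range(n)); the exponent is
  -- ≥ 0 for every i in range(n), so .toNat is exact for Python's **
  ((PySem.List.pyRange 0 n 1).map
    (fun i => PySem.List.pyGetD a i 0 * 10 ^ (PySem.Int.floordiv (n - 1 - i) 2).toNat)).sum

-- ===== PRECONDITION & SPEC =====
-- A raises IndexError iff n exceeds the list length (for n ≤ 0 the loop is empty).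
def Pre_solve (arr : List Int) (n : Int) : Prop := n ≤ (arr.length : Int)
instance (arr : List Int) (n : Int) : Decidable (Pre_solve arr n) := by unfold Pre_solve; infer_instance
def pvWitness_solve : List Int × Int := ([3, 1, 2, 4], 4)
def Spec_solve (arr : List Int) (n : Int) (out : Int) : Prop := out = solve_alt arr n
instance (arr : List Int) (n : Int) (out : Int) : Decidable (Spec_solve arr n out) := by unfold Spec_solve; infer_instance

-- ===== CLAIM (what is proved, stated in full; the proofs are below) =====
def Claim_equal_solve : Prop := ∀ (arr : List Int) (n : Int), Dom_solve arr n → Pre_solve arr n → Spec_solve arr n (solve arr n)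

-- ===== LEMMAS AND PROOFS =====

-- partial positional sums: T a m p = Σ_{i<m, i%2=p} a[i] * 10^((m-1-i)/2)
def T (a : List Int) (m p : ℕ) : Int :=
  ∑ i ∈ Finset.range m, if i % 2 = p then a.getD i 0 * 10 ^ ((m - 1 - i) / 2) else 0

lemma T_succ (a : List Int) (m p : ℕ) :
    T a (m + 1) p = if m % 2 = p then 10 * T a m p + a.getD m 0 else T a m p := by
  unfold T
  rw [Finset.sum_range_succ]
  by_cases hp : m % 2 = p
  · simp only [hp]
    have h0 : (m + 1 - 1 - m) / 2 = 0 := by omega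
    rw [h0, pow_zero, mul_one, Finset.mul_sum]
    congr 1
    refine Finset.sum_congr rfl (fun i hi => ?_)
    have him : i < m := Finset.mem_range.mp hi
    by_cases hip : i % 2 = p
    · rw [if_pos hip, if_pos hip]
      have he : (m + 1 - 1 - i) / 2 = (m - 1 - i) / 2 + 1 := by omega
      rw [he, pow_succ]; ring
    · rw [if_neg hip, if_neg hip, mul_zero]
  · rw [if_neg hp, if_neg hp, add_zero]
    refine Finset.sum_congr rfl (fun i hi => ?_)
    have him : i < m := Finset.mem_range.mp hi
    by_cases hip : i % 2 = p
    · rw [if_pos hip, if_pos hip]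
      have he : (m + 1 - 1 - i) / 2 = (m - 1 - i) / 2 := by omega
      rw [he]
    · rw [if_neg hip, if_neg hip]

lemma solveLoop_eq (a : List Int) (m : ℕ) (hm : m ≤ a.length) :
    solveLoop a (PySem.List.pyRange 0 (m : Int) 1) = some (T a m 0, T a m 1) := by
  induction m with
  | zero => simp [solveLoop, PySem.List.pyRange_one_eq_nil, T]
  | succ k ih =>
    have hk : k ≤ a.length := Nat.le_of_succ_le hm
    rw [show ((k + 1 : ℕ) : Int) = (k : Int) + 1 by push_cast; ring,
      PySem.List.pyRange_one_succ_right (by positivity)]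
    unfold solveLoop at ih ⊢
    rw [List.foldl_append, ih hk]
    simp only [List.foldl_cons, List.foldl_nil]
    have hk' : k < a.length := hm
    have hget : PySem.List.pyGet? a (k : Int) = some (a.getD k 0) := by
      simp [PySem.List.pyGet?_natCast, List.getElem?_eq_getElem hk', List.getD_eq_getElem?_getD]
    have hmod : PySem.Int.mod (k : Int) 2 = ((k % 2 : ℕ) : Int) := PySem.Int.mod_natCast k 2
    rcases Nat.mod_two_eq_zero_or_one k with h | h
    · have hz : PySem.Int.mod (k : Int) 2 = 0 := by rw [hmod, h]; rfl
      simp only [hget, hz, T_succ, h]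
      refine congrArg some ?_
      norm_num [Prod.mk.injEq]
      ring
    · have hz : ¬ PySem.Int.mod (k : Int) 2 = 0 := by rw [hmod, h]; decide
      simp only [hget, hz, T_succ, h]
      refine congrArg some ?_
      norm_num [Prod.mk.injEq]
      ring

lemma sum_map_range_eq (m : ℕ) (f : ℕ → Int) :
    ((List.range m).map f).sum = ∑ i ∈ Finset.range m, f i := by
  induction m with
  | zero => simp
  | succ k ih => rw [List.range_succ, List.map_append, List.sum_append, Finset.sum_range_succ, ih]; simp

lemma sum_alt_eq (a : List Int) (m : ℕ) :
    ((PySem.List.pyRange 0 (m : Int) 1).map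
      (fun i => PySem.List.pyGetD a i 0 * 10 ^ (PySem.Int.floordiv ((m : Int) - 1 - i) 2).toNat)).sum
      = T a m 0 + T a m 1 := by
  rw [PySem.List.pyRange_zero_nat, List.map_map]
  have hmap : ∀ i ∈ List.range m,
      ((fun i => PySem.List.pyGetD a i 0 * 10 ^ (PySem.Int.floordiv ((m : Int) - 1 - i) 2).toNat) ∘
        (fun k : ℕ => (k : Int))) i = a.getD i 0 * 10 ^ ((m - 1 - i) / 2) := by
    intro i hi
    have him : i < m := List.mem_range.mp hi
    have hcast : (m : Int) - 1 - (i : Int) = ((m - 1 - i : ℕ) : Int) := by omega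
    have hfd : PySem.Int.floordiv (((m - 1 - i : ℕ) : Int)) 2 = (((m - 1 - i) / 2 : ℕ) : Int) := by
      exact_mod_cast PySem.Int.floordiv_natCast (m - 1 - i) 2
    simp only [Function.comp, PySem.List.pyGetD_natCast, hcast, hfd, Int.toNat_natCast]
  rw [List.map_congr_left hmap, sum_map_range_eq]
  unfold T
  rw [← Finset.sum_add_distrib]
  refine Finset.sum_congr rfl (fun i _ => ?_)
  rcases Nat.mod_two_eq_zero_or_one i with h | h <;> simp [h]

-- ===== VERDICT (by name: the statement is the Claim_ definition above) =====
theorem solve_spec : Claim_equal_solve := by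
  intro arr n _hdom hpre
  show solve arr n = solve_alt arr n
  simp only [solve, solve_alt]
  by_cases hn : n ≤ 0
  · rw [PySem.List.pyRange_one_eq_nil hn]
    simp [solveLoop]
  · have hn' : n = (n.toNat : Int) := (Int.toNat_of_nonneg (by omega)).symm
    have hm : n.toNat ≤ (PySem.List.sorted arr (fun x => x) false).length := by
      rw [PySem.List.length_sorted]; exact Int.toNat_le.mpr hpre
    rw [hn', solveLoop_eq _ n.toNat hm, sum_alt_eq]
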